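-- pv_equiv track=rewrite | github.com/Uzma1602/streak_module | mindapp/serializers.py | process_black_true
-- ===== SOURCE A (Python) =====
-- def process_black_true(date_dict):
--     processed_dict = date_dict.copy()
--     black_false_encountered = False
--
--     for day in reversed(processed_dict):
--         if processed_dict[day] == "BlackFalse":
--             black_false_encountered = True
--         elif processed_dict[day] == "True" and black_false_encountered:
--             processed_dict[day] = "BlackTrue"
--
--     return processed_dict
-- ===== SOURCE B (Python) =====
-- def process_black_true(date_dict):
--     cut = None
--     for i, v in enumerate(date_dict.values()):
--         if v == "BlackFalse":
--             cut = i
--     if cut is None: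
--         return date_dict.copy()
--     return {k: ("BlackTrue" if i < cut and v == "True" else v)
--             for i, (k, v) in enumerate(date_dict.items())}
-- ===== Notes on version B (the rewrite author's own statement) =====
-- stated objective: alternative
-- what changed: Replaces A's reverse scan with a sticky flag and in-place dict updates by a compute-the-last-BlackFalse-index pass followed by one forward comprehension that rewrites 'True' entries strictly before that cutoff.
import Mathlib
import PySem

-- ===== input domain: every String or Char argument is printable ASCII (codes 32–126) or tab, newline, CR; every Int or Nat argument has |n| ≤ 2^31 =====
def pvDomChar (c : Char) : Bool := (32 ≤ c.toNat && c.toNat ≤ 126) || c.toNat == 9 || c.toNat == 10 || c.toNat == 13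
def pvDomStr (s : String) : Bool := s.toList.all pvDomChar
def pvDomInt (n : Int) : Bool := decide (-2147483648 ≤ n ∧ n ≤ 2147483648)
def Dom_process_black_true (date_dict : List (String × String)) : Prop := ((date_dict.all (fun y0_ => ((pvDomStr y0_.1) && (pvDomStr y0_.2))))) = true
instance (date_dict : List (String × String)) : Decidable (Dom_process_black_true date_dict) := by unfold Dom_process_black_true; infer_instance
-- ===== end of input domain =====

-- B computes the index of the last "BlackFalse" first and then does one forward pass,
-- instead of A's reverse scan with a sticky flag; same cost, different decomposition.

-- ===== PORT A =====
-- dict lookup d[k]: first matching key (keys are unique in a Python dict)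
def pvGetVal (d : List (String × String)) (k : String) : Option String :=
  match d with
  | [] => none
  | (k', v) :: rest => if k' = k then some v else pvGetVal rest k

-- dict assignment d[k] = v: overwrite in place keeping position, append if new
def pvSetVal (d : List (String × String)) (k : String) (v : String) : List (String × String) :=
  match d with
  | [] => [(k, v)]
  | (k', v') :: rest => if k' = k then (k', v) :: rest else (k', v') :: pvSetVal rest k v

-- one iteration of A's loop body; state = (processed_dict, black_false_encountered)
def pvStepA (st : List (String × String) × Bool) (day : String) : List (String × String) × Bool :=
  if pvGetVal st.1 day = some "BlackFalse" then (st.1, true)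
  else if pvGetVal st.1 day = some "True" ∧ st.2 = true then (pvSetVal st.1 day "BlackTrue", st.2)
  else st

def process_black_true (date_dict : List (String × String)) : List (String × String) :=
  ((date_dict.map Prod.fst).reverse.foldl pvStepA (date_dict, false)).1

-- ===== PORT B =====
-- B's first loop: index of the LAST "BlackFalse" value, None if absent
def pvCut (vs : List String) : Option Int :=
  (PySem.List.enumerate vs 0).foldl
    (fun acc iv => if iv.2 = "BlackFalse" then some iv.1 else acc) none

def process_black_true_alt (date_dict : List (String × String)) : List (String × String) :=
  match pvCut (date_dict.map Prod.snd) with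
  | none => date_dict
  | some c => (PySem.List.enumerate date_dict 0).map
      (fun ip => if ip.1 < c ∧ ip.2.2 = "True" then (ip.2.1, "BlackTrue") else ip.2)

-- ===== PRECONDITION & SPEC =====
-- Pre_ excludes association lists with duplicate keys: A's argument is a Python dict,
-- in which duplicate keys cannot exist (they collapse when the dict is built).
def Pre_process_black_true (date_dict : List (String × String)) : Prop :=
  (date_dict.map Prod.fst).Nodup
instance (date_dict : List (String × String)) : Decidable (Pre_process_black_true date_dict) := by
  unfold Pre_process_black_true; infer_instance

def pvWitness_process_black_true : (List (String × String)) :=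
  [("2024-01-01", "True"), ("2024-01-02", "BlackFalse")]

def Spec_process_black_true (date_dict : List (String × String)) (out : List (String × String)) : Prop := out = process_black_true_alt date_dict
instance (date_dict : List (String × String)) (out : List (String × String)) : Decidable (Spec_process_black_true date_dict out) := by unfold Spec_process_black_true; infer_instance

-- ===== CLAIM (what is proved, stated in full; the proofs are below) =====
def Claim_equal_process_black_true : Prop := ∀ (date_dict : List (String × String)), Dom_process_black_true date_dict → Pre_process_black_true date_dict → Spec_process_black_true date_dict (process_black_true date_dict)

-- ===== LEMMAS AND PROOFS =====

-- the pointwise effect of A's loop once the flag is set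
def pvMark (xs : List (String × String)) : List (String × String) :=
  xs.map (fun p => if p.2 = "True" then (p.1, "BlackTrue") else p)

theorem pvGetVal_append_left (xs ys : List (String × String)) (k : String)
    (h : k ∈ xs.map Prod.fst) : pvGetVal (xs ++ ys) k = pvGetVal xs k := by
  induction xs with
  | nil => simp at h
  | cons p rest ih =>
    simp only [List.cons_append, pvGetVal]
    split
    · rfl
    · rename_i hne
      simp only [List.map_cons, List.mem_cons] at h
      exact ih (h.resolve_left (fun hh => hne hh.symm))

theorem pvGetVal_append_self (xs ys : List (String × String)) (k v : String)
    (h : k ∉ xs.map Prod.fst) : pvGetVal (xs ++ (k, v) :: ys) k = some v := by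
  induction xs with
  | nil => simp [pvGetVal]
  | cons p rest ih =>
    simp only [List.map_cons, List.mem_cons] at h
    rw [not_or] at h
    simp only [List.cons_append, pvGetVal]
    rw [if_neg (fun hh => h.1 hh.symm)]
    exact ih h.2

theorem pvSetVal_append_left (xs ys : List (String × String)) (k v : String)
    (h : k ∈ xs.map Prod.fst) : pvSetVal (xs ++ ys) k v = pvSetVal xs k v ++ ys := by
  induction xs with
  | nil => simp at h
  | cons p rest ih =>
    simp only [List.cons_append, pvSetVal]
    split
    · rfl
    · rename_i hne
      simp only [List.map_cons, List.mem_cons] at h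
      rw [ih (h.resolve_left (fun hh => hne hh.symm))]
      simp

theorem pvSetVal_append_self (xs ys : List (String × String)) (k v w : String)
    (h : k ∉ xs.map Prod.fst) : pvSetVal (xs ++ (k, v) :: ys) k w = xs ++ (k, w) :: ys := by
  induction xs with
  | nil => simp [pvSetVal]
  | cons p rest ih =>
    simp only [List.map_cons, List.mem_cons] at h
    rw [not_or] at h
    simp only [List.cons_append, pvSetVal]
    rw [if_neg (fun hh => h.1 hh.symm), ih h.2]

theorem pvSetVal_keys (xs : List (String × String)) (k v : String)
    (h : k ∈ xs.map Prod.fst) : (pvSetVal xs k v).map Prod.fst = xs.map Prod.fst := by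
  induction xs with
  | nil => simp at h
  | cons p rest ih =>
    simp only [pvSetVal]
    split
    · simp
    · rename_i hne
      simp only [List.map_cons, List.mem_cons] at h
      simp [ih (h.resolve_left (fun hh => hne hh.symm))]

theorem pvStepA_keys (st : List (String × String) × Bool) (day : String)
    (h : day ∈ st.1.map Prod.fst) :
    (pvStepA st day).1.map Prod.fst = st.1.map Prod.fst := by
  unfold pvStepA
  split
  · rfl
  · split
    · exact pvSetVal_keys st.1 day "BlackTrue" h
    · rfl

-- frame lemma: a key-disjoint tail rides along untouched
theorem pvFold_frame (ks : List String) (xs ys : List (String × String)) (b : Bool)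
    (h : ∀ k ∈ ks, k ∈ xs.map Prod.fst) :
    ks.foldl pvStepA (xs ++ ys, b)
      = ((ks.foldl pvStepA (xs, b)).1 ++ ys, (ks.foldl pvStepA (xs, b)).2) := by
  induction ks generalizing xs b with
  | nil => simp
  | cons k rest ih =>
    have hk : k ∈ xs.map Prod.fst := h k (by simp)
    have hstep : pvStepA (xs ++ ys, b) k
        = ((pvStepA (xs, b) k).1 ++ ys, (pvStepA (xs, b) k).2) := by
      unfold pvStepA
      rw [pvGetVal_append_left xs ys k hk]
      split
      · rfl
      · split
        · simp [pvSetVal_append_left xs ys k "BlackTrue" hk]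
        · rfl
    have hkeys := pvStepA_keys (xs, b) k hk
    simp only [List.foldl_cons, hstep]
    rw [ih (pvStepA (xs, b) k).1 (pvStepA (xs, b) k).2
      (by intro a ha; rw [hkeys]; exact h a (by simp [ha]))]

-- with the flag set, A's remaining loop marks every "True" entry
theorem pvFold_mark (xs : List (String × String)) (h : (xs.map Prod.fst).Nodup) :
    (xs.map Prod.fst).reverse.foldl pvStepA (xs, true) = (pvMark xs, true) := by
  induction xs using List.reverseRecOn with
  | nil => simp [pvMark]
  | append_singleton ys p ih =>
    obtain ⟨k, v⟩ := p
    rw [List.map_append, List.nodup_append] at h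
    obtain ⟨hys, -, hdisj⟩ := h
    have hk : k ∉ ys.map Prod.fst := by
      intro hmem
      exact hdisj _ hmem k (by simp) rfl
    have hget : pvGetVal (ys ++ [(k, v)]) k = some v := pvGetVal_append_self ys [] k v hk
    have hrev : ((ys ++ [(k, v)]).map Prod.fst).reverse
        = k :: (ys.map Prod.fst).reverse := by simp
    have hmem : ∀ a ∈ (ys.map Prod.fst).reverse, a ∈ ys.map Prod.fst := by
      intro a ha; simpa using ha
    rw [hrev, List.foldl_cons]
    by_cases hbf : v = "BlackFalse"
    · subst hbf
      have hstep : pvStepA (ys ++ [(k, "BlackFalse")], true) k = (ys ++ [(k, "BlackFalse")], true) := by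
        unfold pvStepA
        rw [hget]
        simp
      rw [hstep, pvFold_frame _ _ _ _ hmem, ih hys]
      simp [pvMark]
    · by_cases ht : v = "True"
      · subst ht
        have hstep : pvStepA (ys ++ [(k, "True")], true) k = (ys ++ [(k, "BlackTrue")], true) := by
          unfold pvStepA
          rw [hget, if_neg (by simp), if_pos (by simp),
            pvSetVal_append_self ys [] k "True" "BlackTrue" hk]
        rw [hstep, pvFold_frame _ _ _ _ hmem, ih hys]
        simp [pvMark]
      · have hstep : pvStepA (ys ++ [(k, v)], true) k = (ys ++ [(k, v)], true) := by
          unfold pvStepA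
          rw [hget, if_neg (by simp [hbf]), if_neg (by simp [ht])]
        rw [hstep, pvFold_frame _ _ _ _ hmem, ih hys]
        simp [pvMark, ht]

-- with the flag clear and no "BlackFalse" anywhere, A's loop is the identity
theorem pvFold_id (xs : List (String × String)) (h : (xs.map Prod.fst).Nodup)
    (hnf : ∀ p ∈ xs, p.2 ≠ "BlackFalse") :
    (xs.map Prod.fst).reverse.foldl pvStepA (xs, false) = (xs, false) := by
  induction xs using List.reverseRecOn with
  | nil => simp
  | append_singleton ys p ih =>
    obtain ⟨k, v⟩ := p
    rw [List.map_append, List.nodup_append] at h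
    obtain ⟨hys, -, hdisj⟩ := h
    have hk : k ∉ ys.map Prod.fst := by
      intro hmem; exact hdisj _ hmem k (by simp) rfl
    have hget : pvGetVal (ys ++ [(k, v)]) k = some v := pvGetVal_append_self ys [] k v hk
    have hbf : v ≠ "BlackFalse" := hnf (k, v) (by simp)
    have hstep : pvStepA (ys ++ [(k, v)], false) k = (ys ++ [(k, v)], false) := by
      unfold pvStepA
      rw [hget, if_neg (by simp [hbf]), if_neg (by simp)]
    have hmem : ∀ a ∈ (ys.map Prod.fst).reverse, a ∈ ys.map Prod.fst := by
      intro a ha; simpa using ha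
    have hrev : ((ys ++ [(k, v)]).map Prod.fst).reverse
        = k :: (ys.map Prod.fst).reverse := by simp
    rw [hrev, List.foldl_cons, hstep, pvFold_frame _ _ _ _ hmem,
      ih hys (fun p hp => hnf p (by simp [hp]))]

theorem pvCut_append_singleton (vs : List String) (v : String) :
    pvCut (vs ++ [v]) = if v = "BlackFalse" then some (vs.length : Int) else pvCut vs := by
  unfold pvCut
  rw [PySem.List.enumerate_append, List.foldl_append]
  simp

theorem pvCut_eq_none (vs : List String) (h : pvCut vs = none) :
    ∀ v ∈ vs, v ≠ "BlackFalse" := by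
  induction vs using List.reverseRecOn with
  | nil => simp
  | append_singleton ws w ih =>
    rw [pvCut_append_singleton] at h
    split at h
    · simp at h
    · rename_i hw
      intro v hv
      rcases List.mem_append.mp hv with hv | hv
      · exact ih h v hv
      · simp at hv; subst hv; exact hw

theorem pvCut_lt_length (vs : List String) (c : Int) (h : pvCut vs = some c) :
    0 ≤ c ∧ c < vs.length := by
  induction vs using List.reverseRecOn generalizing c with
  | nil => simp [pvCut, PySem.List.enumerate] at h
  | append_singleton ws w ih =>
    rw [pvCut_append_singleton] at h
    split at h
    · rw [Option.some.injEq] at h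
      subst h
      refine ⟨Int.natCast_nonneg _, ?_⟩
      simp only [List.length_append, List.length_singleton]
      push_cast; omega
    · obtain ⟨h0, hlt⟩ := ih c h
      refine ⟨h0, ?_⟩
      simp only [List.length_append, List.length_singleton]
      push_cast at hlt ⊢; omega

theorem pvAlt_cut_none (d : List (String × String))
    (h : pvCut (d.map Prod.snd) = none) : process_black_true_alt d = d := by
  unfold process_black_true_alt
  rw [h]

theorem pvAlt_cut_some (d : List (String × String)) (c : Int)
    (h : pvCut (d.map Prod.snd) = some c) :
    process_black_true_alt d = (PySem.List.enumerate d 0).map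
      (fun ip => if ip.1 < c ∧ ip.2.2 = "True" then (ip.2.1, "BlackTrue") else ip.2) := by
  unfold process_black_true_alt
  rw [h]

theorem pvEnum_map_snd {α β : Type} (xs : List α) (h : α → β) :
    (PySem.List.enumerate xs 0).map (fun ip => h ip.2) = xs.map h := by
  have hm := PySem.List.map_snd_enumerate (xs := xs) (s := 0)
  calc (PySem.List.enumerate xs 0).map (fun ip => h ip.2)
      = ((PySem.List.enumerate xs 0).map (·.2)).map h := by rw [List.map_map]; rfl
    _ = xs.map h := by rw [hm]

-- ===== VERDICT (by name: the statement is the Claim_ definition above) =====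
theorem process_black_true_spec : Claim_equal_process_black_true := by
  intro d hdom hpre
  unfold Spec_process_black_true
  unfold Pre_process_black_true at hpre
  clear hdom
  induction d using List.reverseRecOn with
  | nil => rfl
  | append_singleton xs p ih =>
    obtain ⟨k, v⟩ := p
    rw [List.map_append, List.nodup_append] at hpre
    obtain ⟨hxs, -, hdisj⟩ := hpre
    have hk : k ∉ xs.map Prod.fst := by
      intro hmem; exact hdisj _ hmem k (by simp) rfl
    have hget : pvGetVal (xs ++ [(k, v)]) k = some v := pvGetVal_append_self xs [] k v hk
    have hmem : ∀ a ∈ (xs.map Prod.fst).reverse, a ∈ xs.map Prod.fst := by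
      intro a ha; simpa using ha
    have hrev : (((xs ++ [(k, v)]).map Prod.fst)).reverse
        = k :: (xs.map Prod.fst).reverse := by simp
    have hsnd : (xs ++ [(k, v)]).map Prod.snd = xs.map Prod.snd ++ [v] := by simp
    have henum : PySem.List.enumerate (xs ++ [(k, v)]) 0
        = PySem.List.enumerate xs 0 ++ [((xs.length : Int), (k, v))] := by
      rw [PySem.List.enumerate_append]
      simp [PySem.List.enumerate]
    by_cases hbf : v = "BlackFalse"
    · -- A: flag is set immediately, everything before gets marked
      have hstep : pvStepA (xs ++ [(k, v)], false) k = (xs ++ [(k, v)], true) := by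
        unfold pvStepA
        rw [hget]
        simp [hbf]
      have hA : process_black_true (xs ++ [(k, v)]) = pvMark xs ++ [(k, v)] := by
        unfold process_black_true
        rw [hrev, List.foldl_cons, hstep, pvFold_frame _ _ _ _ hmem, pvFold_mark xs hxs]
      -- B: cut = length xs, and the forward pass marks everything before it
      have hcut : pvCut ((xs ++ [(k, v)]).map Prod.snd) = some (xs.length : Int) := by
        rw [hsnd, pvCut_append_singleton]
        simp [hbf]
      have hB : process_black_true_alt (xs ++ [(k, v)]) = pvMark xs ++ [(k, v)] := by
        rw [pvAlt_cut_some _ _ hcut, henum, List.map_append]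
        congr 1
        · have hcong : (PySem.List.enumerate xs 0).map
              (fun ip => if ip.1 < (xs.length : Int) ∧ ip.2.2 = "True" then (ip.2.1, "BlackTrue") else ip.2)
              = (PySem.List.enumerate xs 0).map
              (fun ip => if ip.2.2 = "True" then (ip.2.1, "BlackTrue") else ip.2) := by
            apply List.map_congr_left
            intro ip hip
            rcases (PySem.List.mem_enumerate_iff xs 0 ip).mp hip with ⟨j, hj, rfl⟩
            have : (0 : Int) + j < (xs.length : Int) := by omega
            simp only [this, true_and]
          rw [hcong, pvEnum_map_snd xs (fun q => if q.2 = "True" then (q.1, "BlackTrue") else q)]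
          rfl
        · simp
      rw [hA, hB]
    · -- A leaves the last entry alone and recurses on xs
      have hstep : pvStepA (xs ++ [(k, v)], false) k = (xs ++ [(k, v)], false) := by
        unfold pvStepA
        rw [hget, if_neg (by simp [hbf]), if_neg (by simp)]
      have hA : process_black_true (xs ++ [(k, v)]) = process_black_true xs ++ [(k, v)] := by
        unfold process_black_true
        rw [hrev, List.foldl_cons, hstep, pvFold_frame _ _ _ _ hmem]
      have hcut : pvCut ((xs ++ [(k, v)]).map Prod.snd) = pvCut (xs.map Prod.snd) := by
        rw [hsnd, pvCut_append_singleton]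
        simp [hbf]
      cases hc : pvCut (xs.map Prod.snd) with
      | none =>
        have hnf : ∀ p ∈ xs, p.2 ≠ "BlackFalse" := by
          intro p hp
          exact pvCut_eq_none _ hc p.2 (List.mem_map.mpr ⟨p, hp, rfl⟩)
        have hAid : process_black_true xs = xs := by
          unfold process_black_true
          rw [pvFold_id xs hxs hnf]
        have hB : process_black_true_alt (xs ++ [(k, v)]) = xs ++ [(k, v)] :=
          pvAlt_cut_none _ (hcut.trans hc)
        rw [hA, hAid, hB]
      | some c =>
        obtain ⟨h0, hlt⟩ := pvCut_lt_length _ _ hc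
        have hB : process_black_true_alt (xs ++ [(k, v)])
            = process_black_true_alt xs ++ [(k, v)] := by
          rw [pvAlt_cut_some _ _ (hcut.trans hc), pvAlt_cut_some _ _ hc, henum, List.map_append]
          congr 1
          have hno : ¬ (((xs.length : Int)) < c ∧ v = "True") := by
            rintro ⟨hl, -⟩
            simp only [List.length_map] at hlt
            omega
          simp [hno]
        rw [hA, hB, ih hxs]
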